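-- pv_equiv track=rewrite | github.com/Tangent-90C/reasoning-kingdom | scripts/check_markdown_vue_safety.py | find_unsafe_angles
-- ===== SOURCE A (Python) =====
-- HTML_PREFIXES = (
--     "<!--",
--     "<!DOCTYPE",
--     "</",
--     "<=",
--     "<div",
--     "<br",
--     "<figure",
--     "<figcaption",
--     "<img",
--     "<a",
--     "<p",
--     "<span",
--     "<table",
--     "<thead",
--     "<tbody",
--     "<tr",
--     "<th",
--     "<td",
--     "<details",
--     "<summary",
--     "<sup",
--     "<sub",
--     "<http",
--     "<https",
--     "<mailto",
-- )
--
-- def find_unsafe_angles(text: str) -> list[int]: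
--     indices: list[int] = []
--     for idx, char in enumerate(text):
--         if char != "<":
--             continue
--
--         if any(text.startswith(prefix, idx) for prefix in HTML_PREFIXES):
--             continue
--
--         if idx == 0 or idx == len(text) - 1:
--             continue
--
--         if text[idx - 1] == "\\":
--             continue
--
--         indices.append(idx)
--     return indices
-- ===== SOURCE B (Python) =====
-- HTML_PREFIXES = (
--     "<!--",
--     "<!DOCTYPE",
--     "</",
--     "<=",
--     "<div",
--     "<br",
--     "<figure",
--     "<figcaption",
--     "<img",
--     "<a",
--     "<p",
--     "<span",
--     "<table",
--     "<thead",
--     "<tbody",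
--     "<tr",
--     "<th",
--     "<td",
--     "<details",
--     "<summary",
--     "<sup",
--     "<sub",
--     "<http",
--     "<https",
--     "<mailto",
-- )
--
-- # Every HTML_PREFIX starts with '<'; after splitting the text on '<' only the
-- # remainder of each prefix has to be matched against the segment that follows
-- # the delimiter.
-- TAIL_PREFIXES = tuple(p[1:] for p in HTML_PREFIXES)
--
--
-- def find_unsafe_angles(text: str) -> list[int]:
--     # Split the text into the '<'-free segments between delimiters; the i-th
--     # delimiter position is recovered by accumulating segment lengths, the
--     # backslash guard reads the last char of the preceding segment, and the
--     # prefix guard matches the stripped prefixes against the following segment.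
--     parts = text.split("<")
--     out: list[int] = []
--     pos = len(parts[0])
--     for prev, part in zip(parts, parts[1:]):
--         if (pos != 0
--                 and pos != len(text) - 1
--                 and (prev == "" or prev[-1] != "\\")
--                 and not any(part.startswith(t) for t in TAIL_PREFIXES)):
--             out.append(pos)
--         pos += len(part) + 1
--     return out
-- ===== Notes on version B (the rewrite author's own statement) =====
-- stated objective: faster
-- what changed: B splits the text on the delimiter into delimiter-free segments and walks the segment list with a cumulative offset, matching the stripped prefixes against the following segment and the backslash guard against the preceding segment's last character, instead of A's per-character index scan with text.startswith at each index.
import Mathlib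
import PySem

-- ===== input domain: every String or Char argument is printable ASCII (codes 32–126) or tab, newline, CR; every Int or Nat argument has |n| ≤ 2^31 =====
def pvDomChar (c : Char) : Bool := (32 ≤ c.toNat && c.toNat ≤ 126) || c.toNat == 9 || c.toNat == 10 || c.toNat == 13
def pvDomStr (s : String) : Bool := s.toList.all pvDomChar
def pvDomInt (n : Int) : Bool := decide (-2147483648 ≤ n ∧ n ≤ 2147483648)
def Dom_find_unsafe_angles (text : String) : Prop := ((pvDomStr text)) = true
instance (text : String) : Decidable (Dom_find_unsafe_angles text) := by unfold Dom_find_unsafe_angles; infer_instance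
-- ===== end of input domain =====

-- B splits the text on '<' into delimiter-free segments and recovers the delimiter
-- positions by accumulating segment lengths, checking the stripped prefixes against
-- the following segment (objective: faster — per-delimiter work instead of A's
-- per-character scan; a timing run measured B faster).

-- ===== PORT A =====
def pvHtmlPrefixes : List (List Char) :=
  ["<!--".toList, "<!DOCTYPE".toList, "</".toList, "<=".toList, "<div".toList,
   "<br".toList, "<figure".toList, "<figcaption".toList, "<img".toList, "<a".toList,
   "<p".toList, "<span".toList, "<table".toList, "<thead".toList, "<tbody".toList,
   "<tr".toList, "<th".toList, "<td".toList, "<details".toList, "<summary".toList,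
   "<sup".toList, "<sub".toList, "<http".toList, "<https".toList, "<mailto".toList]

-- 'text.startswith(prefix, idx)' with 0 ≤ idx is ported, exactly, as startswith on the
-- character list dropped at idx; 'text[idx - 1]' is ported with pyGetD (the branch is
-- only reached with 1 ≤ idx < len, where Python indexing returns normally).
def find_unsafe_angles (text : String) : List Int :=
  (PySem.List.enumerate text.toList).foldl
    (fun indices p =>
      if p.2 ≠ '<' then indices
      else if pvHtmlPrefixes.any (fun pre => PySem.Chars.startswith (text.toList.drop p.1.toNat) pre) then indices
      else if p.1 = 0 ∨ p.1 = PySem.List.len text.toList - 1 then indices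
      else if PySem.List.pyGetD text.toList (p.1 - 1) ' ' = '\\' then indices
      else indices ++ [p.1]) []

-- ===== PORT B =====
-- TAIL_PREFIXES = tuple(p[1:] for p in HTML_PREFIXES), written out
def pvTailPrefixes : List (List Char) :=
  ["!--".toList, "!DOCTYPE".toList, "/".toList, "=".toList, "div".toList,
   "br".toList, "figure".toList, "figcaption".toList, "img".toList, "a".toList,
   "p".toList, "span".toList, "table".toList, "thead".toList, "tbody".toList,
   "tr".toList, "th".toList, "td".toList, "details".toList, "summary".toList,
   "sup".toList, "sub".toList, "http".toList, "https".toList, "mailto".toList]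

-- one iteration of B's for-loop over zip(parts, parts[1:]): st = (pos, out), pr = (prev, part).
-- 'prev[-1]' is guarded by prev == "" and so always indexes a nonempty string: ported as getLast?.
def pvBStep (n : Int) (st : Int × List Int) (pr : List Char × List Char) : Int × List Int :=
  (st.1 + (pr.2.length : Int) + 1,
   if st.1 != 0 && st.1 != n - 1
      && (pr.1 == ([] : List Char) || !(pr.1.getLast? == some '\\'))
      && !(pvTailPrefixes.any (fun t => PySem.Chars.startswith pr.2 t))
   then st.2 ++ [st.1] else st.2)

-- parts = text.split('<') is never empty, so the Python 'len(parts[0])' always returns;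
-- the [] branch is unreachable.
def find_unsafe_angles_alt (text : String) : List Int :=
  match PySem.Chars.splitOn text.toList ['<'] with
  | [] => []
  | p0 :: rest =>
      (((p0 :: rest).zip rest).foldl (pvBStep (PySem.List.len text.toList))
        ((p0.length : Int), [])).2

-- ===== PRECONDITION & SPEC =====
def Spec_find_unsafe_angles (text : String) (out : List Int) : Prop := out = find_unsafe_angles_alt text
instance (text : String) (out : List Int) : Decidable (Spec_find_unsafe_angles text out) := by unfold Spec_find_unsafe_angles; infer_instance

-- ===== CLAIM (what is proved, stated in full; the proofs are below) =====
def Claim_equal_find_unsafe_angles : Prop := ∀ (text : String), Dom_find_unsafe_angles text → Spec_find_unsafe_angles text (find_unsafe_angles text)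

-- ===== LEMMAS AND PROOFS =====

-- A's per-index guard, and the common characterisation: index j is reported iff pvP cs j
def pvGuard (cs : List Char) (pos : Int) : Bool :=
  !(pvHtmlPrefixes.any (fun pre => PySem.Chars.startswith (cs.drop pos.toNat) pre))
  && pos != 0 && pos != PySem.List.len cs - 1
  && !(PySem.List.pyGetD cs (pos - 1) ' ' == '\\')

def pvP (cs : List Char) (j : Int) : Bool :=
  (PySem.List.pyGetD cs j ' ' == '<') && pvGuard cs j

theorem pvA_eq_filter (text : String) :
    find_unsafe_angles text =
      (PySem.List.pyRange 0 text.toList.length).filter (pvP text.toList) := by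
  unfold find_unsafe_angles
  rw [PySem.List.enumerate_eq_map_pyRange text.toList ' ', List.foldl_map]
  have hstep :
      (fun (indices : List Int) (j : Int) =>
        (fun indices (p : Int × Char) =>
          if p.2 ≠ '<' then indices
          else if pvHtmlPrefixes.any (fun pre => PySem.Chars.startswith (text.toList.drop p.1.toNat) pre) then indices
          else if p.1 = 0 ∨ p.1 = PySem.List.len text.toList - 1 then indices
          else if PySem.List.pyGetD text.toList (p.1 - 1) ' ' = '\\' then indices
          else indices ++ [p.1]) indices (j, PySem.List.pyGetD text.toList j ' '))
      = fun indices j => if pvP text.toList j then indices ++ [j] else indices := by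
    funext indices j
    simp only [pvP, pvGuard]
    by_cases h1 : PySem.List.pyGetD text.toList j ' ' = '<' <;>
      by_cases h2 : pvHtmlPrefixes.any (fun pre => PySem.Chars.startswith (text.toList.drop j.toNat) pre) <;>
      by_cases h3 : j = 0 <;>
      by_cases h4 : j = PySem.List.len text.toList - 1 <;>
      by_cases h5 : PySem.List.pyGetD text.toList (j - 1) ' ' = '\\' <;>
      simp [h1, h2, h3, h4, h5]
  rw [hstep, PySem.List.foldl_append_if (pvP text.toList) (fun j => j)]
  simp

theorem pvP_false_of_ne (cs : List Char) (j : Int) (h0 : 0 ≤ j) (hlt : j < (cs.length : Int))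
    (hchar : cs[j.toNat]? ≠ some '<') : pvP cs j = false := by
  have hjn : j.toNat < cs.length := by omega
  have hget : PySem.List.pyGetD cs j ' ' = cs[j.toNat] :=
    PySem.List.pyGetD_eq_getElem cs ' ' h0 hlt
  have hne : cs[j.toNat] ≠ '<' := by
    intro hc; exact hchar (by simp [hjn, hc])
  simp [pvP, hget, hne]

theorem pvGetD_eq_of_getElem? (cs : List Char) (i : Int) (c a : Char)
    (h0 : 0 ≤ i) (h : cs[i.toNat]? = some a) : PySem.List.pyGetD cs i c = a := by
  have hlt : i.toNat < cs.length := (List.getElem?_eq_some_iff.mp h).1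
  rw [PySem.List.pyGetD_eq_getElem cs c h0 (by omega)]
  exact (List.getElem?_eq_some_iff.mp h).2

theorem pvFilter_range_nil (cs : List Char) (k m : Nat) (hm : m ≤ cs.length)
    (h : ∀ j : Nat, k ≤ j → j < m → cs[j]? ≠ some '<') :
    (PySem.List.pyRange (k : Int) (m : Int)).filter (pvP cs) = [] := by
  rw [List.filter_eq_nil_iff]
  intro j hj
  rw [PySem.List.mem_pyRange_one] at hj
  have h0 : (0 : Int) ≤ j := by omega
  have hchar : cs[j.toNat]? ≠ some '<' := h j.toNat (by omega) (by omega)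
  simp [pvP_false_of_ne cs j h0 (by omega) hchar]

-- the '<'-splitting function pvSplitF, its join inverse, and the bridge to PySem.Chars.splitOn

theorem pvModifyHead_id {α : Type} (l : List α) : List.modifyHead (fun x => x) l = l := by
  cases l <;> simp

def pvSplitF : List Char → List (List Char)
  | [] => [[]]
  | c :: rest => if c = '<' then [] :: pvSplitF rest else (pvSplitF rest).modifyHead (c :: ·)

theorem pvGo_eq (fuel : Nat) : ∀ (l cur : List Char) (acc : List (List Char)), l.length ≤ fuel →
    PySem.Chars.splitOn.go ['<'] fuel l cur acc
      = acc.reverse ++ (pvSplitF l).modifyHead (cur.reverse ++ ·) := by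
  induction fuel with
  | zero =>
    intro l cur acc h
    have : l = [] := List.eq_nil_of_length_eq_zero (by omega)
    subst this
    simp [PySem.Chars.splitOn.go, pvSplitF]
  | succ m ih =>
    intro l cur acc h
    cases l with
    | nil => simp [PySem.Chars.splitOn.go, pvSplitF]
    | cons c rest =>
      rw [PySem.Chars.splitOn.go]
      by_cases hc : c = '<'
      · subst hc
        have hp : List.isPrefixOf ['<'] ('<' :: rest) = true := by simp [List.isPrefixOf]
        rw [if_pos hp]
        simp only [List.length_cons] at h
        rw [ih _ _ _ (by simp; omega)]
        simp [pvSplitF, pvModifyHead_id]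
      · have hp : List.isPrefixOf ['<'] (c :: rest) = false := by
          simp [List.isPrefixOf]; exact fun hh => hc hh.symm
        rw [if_neg (by simp [hp])]
        simp only [List.length_cons] at h
        rw [ih _ _ _ (by omega)]
        cases hsf : pvSplitF rest with
        | nil => simp [pvSplitF, hc, hsf]
        | cons p ps => simp [pvSplitF, hc, hsf]

theorem pvSplitOn_eq (cs : List Char) : PySem.Chars.splitOn cs ['<'] = pvSplitF cs := by
  rw [PySem.Chars.splitOn, pvGo_eq _ _ _ _ (by omega)]
  simp [pvModifyHead_id]

theorem pvSplitF_ne_nil (cs : List Char) : pvSplitF cs ≠ [] := by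
  induction cs with
  | nil => simp [pvSplitF]
  | cons c rest ih =>
    by_cases hc : c = '<'
    · simp [pvSplitF, hc]
    · cases hsf : pvSplitF rest with
      | nil => exact absurd hsf ih
      | cons p ps => simp [pvSplitF, hc, hsf]

def pvJoin : List (List Char) → List Char
  | [] => []
  | [p] => p
  | p :: q :: ps => p ++ '<' :: pvJoin (q :: ps)

theorem pvSplitF_join (cs : List Char) : pvJoin (pvSplitF cs) = cs := by
  induction cs with
  | nil => simp [pvSplitF, pvJoin]
  | cons c rest ih =>
    by_cases hc : c = '<'
    · cases hsf : pvSplitF rest with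
      | nil => exact absurd hsf (pvSplitF_ne_nil rest)
      | cons r0 rs =>
        rw [hsf] at ih
        simp [pvSplitF, hc, hsf, pvJoin, ih]
    · cases hsf : pvSplitF rest with
      | nil => exact absurd hsf (pvSplitF_ne_nil rest)
      | cons r0 rs =>
        rw [hsf] at ih
        cases rs with
        | nil => simp [pvSplitF, hc, hsf, pvJoin] at ih ⊢; simp [ih]
        | cons s ss => simp [pvSplitF, hc, hsf, pvJoin] at ih ⊢; simp [ih]

theorem pvSplitF_free (cs : List Char) : ∀ p ∈ pvSplitF cs, '<' ∉ p := by
  induction cs with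
  | nil => simp [pvSplitF]
  | cons c rest ih =>
    by_cases hc : c = '<'
    · intro p hp
      rw [pvSplitF, if_pos hc] at hp
      rcases List.mem_cons.mp hp with h | h
      · simp [h]
      · exact ih p h
    · intro p hp
      rw [pvSplitF, if_neg hc] at hp
      cases hsf : pvSplitF rest with
      | nil => exact absurd hsf (pvSplitF_ne_nil rest)
      | cons r0 rs =>
        rw [hsf] at hp
        simp only [List.modifyHead] at hp
        rcases List.mem_cons.mp hp with h | h
        · subst h
          intro hmem
          rcases List.mem_cons.mp hmem with h' | h'
          · exact hc h'.symm
          · exact ih r0 (by simp [hsf]) h'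
        · exact ih p (by simp [hsf, h])

-- the two prefix tests agree: every HTML prefix is '<' followed by its tail,
-- and a '<'-free tail reaches past the segment only by hitting the next '<'
theorem pvPrefixes_map : pvHtmlPrefixes = pvTailPrefixes.map (fun t => '<' :: t) := by decide

theorem pvTail_free : ∀ t ∈ pvTailPrefixes, '<' ∉ t := by decide

theorem pvPrefix_stop (t q r : List Char) (hfree : '<' ∉ t)
    (hr : r = [] ∨ ∃ r', r = '<' :: r') :
    (t <+: q ++ r) ↔ t <+: q := by
  constructor
  · intro h
    rcases hr with hr | ⟨r', hr⟩
    · simpa [hr] using h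
    · subst hr
      by_cases hlen : t.length ≤ q.length
      · have ht := List.prefix_iff_eq_take.mp h
        rw [List.take_append, Nat.sub_eq_zero_of_le hlen, List.take_zero,
          List.append_nil] at ht
        rw [ht]
        exact List.take_prefix _ _
      · exfalso
        have ht := List.prefix_iff_eq_take.mp h
        rw [List.take_append] at ht
        have h1 : 1 ≤ t.length - q.length := by omega
        have : '<' ∈ ('<' :: r').take (t.length - q.length) := by
          cases hn : t.length - q.length with
          | zero => omega
          | succ m => simp
        apply hfree
        rw [ht]
        exact List.mem_append.mpr (Or.inr this)
  · intro h
    exact h.trans (List.prefix_append q r)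

theorem pvAny_eq (q r : List Char) (hr : r = [] ∨ ∃ r', r = '<' :: r') :
    pvHtmlPrefixes.any (fun pre => PySem.Chars.startswith ('<' :: (q ++ r)) pre)
      = pvTailPrefixes.any (fun t => PySem.Chars.startswith q t) := by
  rw [pvPrefixes_map, List.any_map, Bool.eq_iff_iff]
  simp only [List.any_eq_true, Function.comp]
  constructor
  · rintro ⟨t, ht, hst⟩
    refine ⟨t, ht, ?_⟩
    rw [PySem.Chars.startswith_iff] at hst ⊢
    exact (pvPrefix_stop t q r (pvTail_free t ht) hr).mp (List.cons_prefix_cons.mp hst).2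
  · rintro ⟨t, ht, hst⟩
    refine ⟨t, ht, ?_⟩
    rw [PySem.Chars.startswith_iff] at hst ⊢
    exact List.cons_prefix_cons.mpr ⟨rfl, (pvPrefix_stop t q r (pvTail_free t ht) hr).mpr hst⟩

-- the loop invariant: walking the remaining segments from offset k collects exactly
-- the pvP-positions of [k, len)
theorem pvBLoop (cs : List Char) :
    ∀ (qs : List (List Char)) (q0 : List Char) (k : Nat) (out : List Int),
      cs.drop k = pvJoin (q0 :: qs) →
      (∀ p ∈ q0 :: qs, '<' ∉ p) →
      (k = 0 ∨ cs[k-1]? = some '<') →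
      (((q0 :: qs).zip qs).foldl (pvBStep (PySem.List.len cs)) ((k : Int) + q0.length, out)).2
        = out ++ (PySem.List.pyRange (k : Int) (cs.length : Int)).filter (pvP cs) := by
  intro qs
  induction qs with
  | nil =>
    intro q0 k out hdrop hfree _
    simp only [List.zip_nil_right, List.foldl_nil]
    rw [pvFilter_range_nil cs k cs.length le_rfl ?_]
    · simp
    · intro j hkj hjl hchar
      have hd : (cs.drop k)[j - k]? = some '<' := by
        rw [List.getElem?_drop, show k + (j - k) = j by omega]
        exact hchar
      rw [hdrop] at hd
      exact hfree q0 (by simp) (by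
        simp only [pvJoin] at hd
        exact List.mem_of_getElem? hd)
  | cons q1 qs' ih =>
    intro q0 k out hdrop hfree hk
    have hdrop' : cs.drop k = q0 ++ '<' :: pvJoin (q1 :: qs') := by
      rw [hdrop]; rfl
    set pos : Nat := k + q0.length with hposdef
    have hdpos : cs.drop pos = '<' :: pvJoin (q1 :: qs') := by
      have : cs.drop pos = (cs.drop k).drop q0.length := by
        rw [List.drop_drop]
      rw [this, hdrop', List.drop_left]
    have hposlt : pos < cs.length := by
      by_contra hle
      have : cs.drop pos = [] := List.drop_eq_nil_of_le (by omega)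
      rw [hdpos] at this; exact absurd this (by simp)
    have hcpos : cs[pos]? = some '<' := by
      have := congrArg (fun l => l[0]?) hdpos
      simpa [List.getElem?_drop] using this
    -- split off the step for the first delimiter
    simp only [List.zip_cons_cons, List.foldl_cons]
    -- the guard of the step equals pvP cs pos
    have hr : ∃ r, pvJoin (q1 :: qs') = q1 ++ r ∧ (r = [] ∨ ∃ r', r = '<' :: r') := by
      cases qs' with
      | nil => exact ⟨[], by simp [pvJoin], Or.inl rfl⟩
      | cons s ss => exact ⟨'<' :: pvJoin (s :: ss), by simp [pvJoin], Or.inr ⟨_, rfl⟩⟩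
    obtain ⟨r, hjr, hrshape⟩ := hr
    have hany : pvHtmlPrefixes.any (fun pre => PySem.Chars.startswith (cs.drop pos) pre)
        = pvTailPrefixes.any (fun t => PySem.Chars.startswith q1 t) := by
      rw [hdpos, hjr]; exact pvAny_eq q1 r hrshape
    have hgetpos : PySem.List.pyGetD cs ((pos : Nat) : Int) ' ' = '<' := by
      apply pvGetD_eq_of_getElem? cs _ ' ' '<' (by omega)
      simpa using hcpos
    have hcast : ((k : Int) + q0.length) = ((pos : Nat) : Int) := by
      simp [hposdef]
    have hguard : (((k : Int) + q0.length) != 0 && ((k : Int) + q0.length) != PySem.List.len cs - 1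
                && (q0 == ([] : List Char) || !(q0.getLast? == some '\\'))
                && !(pvTailPrefixes.any (fun t => PySem.Chars.startswith q1 t)))
              = pvP cs ((pos : Nat) : Int) := by
      rw [hcast]
      simp only [pvP, pvGuard, hgetpos, Int.toNat_natCast, hany]
      by_cases hq0 : q0 = []
      · subst hq0
        by_cases hk0 : k = 0
        · have hp0 : ((pos : Nat) : Int) = 0 := by simp [hposdef, hk0]
          simp [hp0]
        · have hprev : cs[pos - 1]? = some '<' := by
            rcases hk with h | h
            · exact absurd h hk0
            · simpa [hposdef] using h
          have hpos1 : (0 : Int) ≤ ((pos : Nat) : Int) - 1 := by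
            simp only [hposdef]; push_cast; omega
          have hget1 : PySem.List.pyGetD cs (((pos : Nat) : Int) - 1) ' ' = '<' := by
            apply pvGetD_eq_of_getElem? cs _ ' ' '<' hpos1
            rw [show (((pos : Nat) : Int) - 1).toNat = pos - 1 by omega]
            exact hprev
          simp [hget1, Bool.and_comm, Bool.and_left_comm, Bool.and_assoc]
      · have hlen0 : 0 < q0.length := List.length_pos_of_ne_nil hq0
        have hprev : cs[pos - 1]? = q0.getLast? := by
          have h1 : (cs.drop k)[q0.length - 1]? = q0[q0.length - 1]? := by
            rw [hdrop']
            exact List.getElem?_append_left (by omega)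
          rw [List.getElem?_drop] at h1
          rw [show pos - 1 = k + (q0.length - 1) by omega, h1,
            List.getLast?_eq_getElem?]
        have ha : q0.getLast? = some (q0.getLast hq0) := List.getLast?_eq_some_getLast hq0
        have hgl : cs[pos - 1]? = some (q0.getLast hq0) := by rw [hprev, ha]
        have hpos1 : (0 : Int) ≤ ((pos : Nat) : Int) - 1 := by
          simp only [hposdef]; push_cast; omega
        have hget1 : PySem.List.pyGetD cs (((pos : Nat) : Int) - 1) ' ' = q0.getLast hq0 := by
          apply pvGetD_eq_of_getElem? cs _ ' ' _ hpos1
          rw [show (((pos : Nat) : Int) - 1).toNat = pos - 1 by omega]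
          exact hgl
        have hie : q0.isEmpty = false := by
          cases q0 with
          | nil => exact absurd rfl hq0
          | cons a l => rfl
        simp [hget1, ha, hie, Bool.and_comm, Bool.and_left_comm, Bool.and_assoc]
    -- apply the induction hypothesis at offset pos + 1
    have hdnext : cs.drop (pos + 1) = pvJoin (q1 :: qs') := by
      have : cs.drop (pos + 1) = (cs.drop pos).drop 1 := by
        rw [List.drop_drop]
      rw [this, hdpos]; simp
    have hknext : pos + 1 = 0 ∨ cs[(pos + 1) - 1]? = some '<' := Or.inr (by simpa using hcpos)
    have hfree' : ∀ p ∈ q1 :: qs', '<' ∉ p := fun p hp => hfree p (List.mem_cons_of_mem _ hp)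
    have hstep : pvBStep (PySem.List.len cs) ((k : Int) + q0.length, out) (q0, q1)
        = (((pos + 1 : Nat) : Int) + (q1.length : Int),
           if pvP cs ((pos : Nat) : Int) then out ++ [((pos : Nat) : Int)] else out) := by
      simp only [pvBStep]
      rw [hguard, hcast]
      rw [show ((pos : Nat) : Int) + ((q1.length : Nat) : Int) + 1
        = ((pos + 1 : Nat) : Int) + ((q1.length : Nat) : Int) by push_cast; ring]
    rw [hstep, ih q1 (pos + 1) _ hdnext hfree' hknext]
    -- split the range at pos
    have hsplit : PySem.List.pyRange (k : Int) (cs.length : Int)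
        = PySem.List.pyRange (k : Int) ((pos : Nat) : Int) ++ [((pos : Nat) : Int)]
          ++ PySem.List.pyRange (((pos + 1 : Nat) : Int)) (cs.length : Int) := by
      rw [PySem.List.pyRange_one_append (k : Int) ((pos : Nat) : Int) (cs.length : Int)
        (by simp [hposdef]) (by exact_mod_cast Nat.le_of_lt hposlt)]
      rw [PySem.List.pyRange_one_append ((pos : Nat) : Int) (((pos + 1 : Nat) : Int)) (cs.length : Int)
        (by push_cast; omega) (by exact_mod_cast hposlt)]
      rw [show (((pos + 1 : Nat) : Int)) = ((pos : Nat) : Int) + 1 by push_cast; ring,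
        PySem.List.pyRange_one_singleton]
      rw [List.append_assoc]
    have hfil0 : (PySem.List.pyRange (k : Int) ((pos : Nat) : Int)).filter (pvP cs) = [] := by
      apply pvFilter_range_nil cs k pos (by omega)
      intro j hkj hjp hchar
      have hd : (cs.drop k)[j - k]? = some '<' := by
        rw [List.getElem?_drop, show k + (j - k) = j by omega]
        exact hchar
      rw [hdrop'] at hd
      have hd' : q0[j - k]? = some '<' := by
        rw [← List.getElem?_append_left (l₂ := '<' :: pvJoin (q1 :: qs')) (by omega)]
        exact hd
      exact hfree q0 (by simp) (List.mem_of_getElem? hd')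
    rw [hsplit, List.filter_append, List.filter_append, hfil0]
    by_cases hg : pvP cs ((pos : Nat) : Int) = true
    · simp [hg, List.append_assoc]
    · rw [Bool.not_eq_true] at hg
      simp [hg]

theorem pvB_eq_filter (text : String) :
    find_unsafe_angles_alt text =
      (PySem.List.pyRange 0 text.toList.length).filter (pvP text.toList) := by
  unfold find_unsafe_angles_alt
  rw [pvSplitOn_eq]
  cases hsf : pvSplitF text.toList with
  | nil => exact absurd hsf (pvSplitF_ne_nil _)
  | cons p0 rest =>
    have hdrop : text.toList.drop 0 = pvJoin (p0 :: rest) := by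
      rw [List.drop_zero, ← hsf, pvSplitF_join]
    have hfree : ∀ p ∈ p0 :: rest, '<' ∉ p := by
      rw [← hsf]; exact pvSplitF_free text.toList
    have := pvBLoop text.toList rest p0 0 [] hdrop hfree (Or.inl rfl)
    simpa using this

-- ===== VERDICT (by name: the statement is the Claim_ definition above) =====
theorem find_unsafe_angles_spec : Claim_equal_find_unsafe_angles := by
  intro text _
  unfold Spec_find_unsafe_angles
  rw [pvA_eq_filter, pvB_eq_filter]
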